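-- pv_equiv track=rewrite | github.com/Mira-Chronos/Dune-II---The-Maker | resources/tools/keybindings_audit.py | split_top_level_csv
-- ===== SOURCE A (Python) =====
-- def split_top_level_csv(text: str) -> list[str]:
--     parts: list[str] = []
--     current: list[str] = []
--     paren_depth = 0
--     brace_depth = 0
--
--     for char in text:
--         if char == "," and paren_depth == 0 and brace_depth == 0:
--             part = "".join(current).strip()
--             if part:
--                 parts.append(part)
--             current = []
--             continue
--
--         current.append(char)
--
--         if char == "(":
--             paren_depth += 1
--         elif char == ")":
--             paren_depth -= 1
--         elif char == "{":
--             brace_depth += 1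
--         elif char == "}":
--             brace_depth -= 1
--
--     tail = "".join(current).strip()
--     if tail:
--         parts.append(tail)
--
--     return parts
-- ===== SOURCE B (Python) =====
-- def _split_once(s):
--     """Return (text before the first top-level comma, text after it),
--     or (s, None) if there is no top-level comma."""
--     paren_depth = 0
--     brace_depth = 0
--     for i, ch in enumerate(s):
--         if ch == "," and paren_depth == 0 and brace_depth == 0:
--             return s[:i], s[i + 1:]
--         if ch == "(":
--             paren_depth += 1
--         elif ch == ")":
--             paren_depth -= 1
--         elif ch == "{":
--             brace_depth += 1
--         elif ch == "}":
--             brace_depth -= 1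
--     return s, None
--
--
-- def split_top_level_csv(text: str) -> list[str]:
--     parts: list[str] = []
--     rest = text
--     while rest is not None:
--         segment, rest = _split_once(rest)
--         segment = segment.strip()
--         if segment:
--             parts.append(segment)
--     return parts
-- ===== Notes on version B (the rewrite author's own statement) =====
-- stated objective: alternative
-- what changed: A makes one pass maintaining a growing character buffer plus two depth counters and flushes the buffer at each top-level comma; B instead repeatedly finds the first top-level comma with a helper, slices the segment off and recurses/loops on the remainder, never maintaining a buffer.
import Mathlib
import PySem

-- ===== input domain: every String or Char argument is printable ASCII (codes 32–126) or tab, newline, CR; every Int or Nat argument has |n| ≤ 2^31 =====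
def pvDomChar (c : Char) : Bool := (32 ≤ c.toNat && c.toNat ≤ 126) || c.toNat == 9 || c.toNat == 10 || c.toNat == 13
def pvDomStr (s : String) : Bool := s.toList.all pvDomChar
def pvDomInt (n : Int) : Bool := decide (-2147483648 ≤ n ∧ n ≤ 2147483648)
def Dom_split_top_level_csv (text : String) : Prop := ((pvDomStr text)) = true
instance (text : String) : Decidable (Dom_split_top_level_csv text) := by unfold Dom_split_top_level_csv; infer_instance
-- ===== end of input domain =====

-- B replaces A's single pass with a growing character buffer by a repeated
-- "find first top-level comma, slice, continue on the remainder" loop (alternative decomposition, same cost).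


-- ===== PORT A =====
-- loop over the characters with state (parts, current buffer, paren_depth, brace_depth)
def loopA : List Char → List String → List Char → Int → Int → List String
  | [], parts, current, _, _ =>
      let tail := PySem.Str.strip (String.ofList current)
      if tail ≠ "" then parts ++ [tail] else parts
  | c :: cs, parts, current, pd, bd =>
      if c = ',' ∧ pd = 0 ∧ bd = 0 then
        let part := PySem.Str.strip (String.ofList current)
        loopA cs (if part ≠ "" then parts ++ [part] else parts) [] pd bd
      else
        let current' := current ++ [c]
        if c = '(' then loopA cs parts current' (pd + 1) bd
        else if c = ')' then loopA cs parts current' (pd - 1) bd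
        else if c = '{' then loopA cs parts current' pd (bd + 1)
        else if c = '}' then loopA cs parts current' pd (bd - 1)
        else loopA cs parts current' pd bd

def split_top_level_csv (text : String) : List String := loopA text.toList [] [] 0 0

-- ===== PORT B =====
-- per-character depth increments (the if/elif chain of _split_once)
def pdelta (c : Char) : Int := if c = '(' then 1 else if c = ')' then -1 else 0
def bdelta (c : Char) : Int := if c = '{' then 1 else if c = '}' then -1 else 0

-- _split_once: text before the first top-level comma, and `some` remainder (or `none`)
def splitOnce : List Char → Int → Int → List Char × Option (List Char)
  | [], _, _ => ([], none)
  | c :: cs, pd, bd =>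
      if c = ',' ∧ pd = 0 ∧ bd = 0 then ([], some cs)
      else
        let r := splitOnce cs (pd + pdelta c) (bd + bdelta c)
        (c :: r.1, r.2)

-- termination of B's outer loop: the remainder after a top-level comma is strictly shorter
theorem splitOnce_rest_lt (cs : List Char) (pd bd : Int) (s : List Char) (rest : List Char)
    (h : splitOnce cs pd bd = (s, some rest)) : rest.length < cs.length := by
  induction cs generalizing pd bd s with
  | nil => simp [splitOnce] at h
  | cons c cs ih =>
      simp only [splitOnce] at h
      split at h
      · cases h; simp
      · injection h with h1 h2
        have hx : splitOnce cs (pd + pdelta c) (bd + bdelta c)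
            = ((splitOnce cs (pd + pdelta c) (bd + bdelta c)).1, some rest) := by
          rw [← h2]
        have := ih (pd + pdelta c) (bd + bdelta c) _ hx
        simpa using Nat.lt_succ_of_lt this

-- B's outer while loop
def goB (cs : List Char) : List String :=
  match _h : splitOnce cs 0 0 with
  | (s, none) =>
      let seg := PySem.Str.strip (String.ofList s)
      if seg ≠ "" then [seg] else []
  | (s, some rest) =>
      let seg := PySem.Str.strip (String.ofList s)
      (if seg ≠ "" then [seg] else []) ++ goB rest
termination_by cs.length
decreasing_by exact splitOnce_rest_lt cs 0 0 s rest _h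

def split_top_level_csv_alt (text : String) : List String := goB text.toList

-- ===== PRECONDITION & SPEC =====
def Spec_split_top_level_csv (text : String) (out : List String) : Prop := out = split_top_level_csv_alt text
instance (text : String) (out : List String) : Decidable (Spec_split_top_level_csv text out) := by unfold Spec_split_top_level_csv; infer_instance

-- ===== CLAIM (what is proved, stated in full; the proofs are below) =====
def Claim_equal_split_top_level_csv : Prop := ∀ (text : String), Dom_split_top_level_csv text → Spec_split_top_level_csv text (split_top_level_csv text)

-- ===== LEMMAS AND PROOFS =====

-- net depth of a character list
def pdel (cs : List Char) : Int := (cs.map pdelta).sum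
def bdel (cs : List Char) : Int := (cs.map bdelta).sum

-- "no top-level comma when scanned starting from depths (pd, bd)"
def noTop : List Char → Int → Int → Prop
  | [], _, _ => True
  | c :: cs, pd, bd => ¬(c = ',' ∧ pd = 0 ∧ bd = 0) ∧ noTop cs (pd + pdelta c) (bd + bdelta c)

theorem pdel_append_one (cs : List Char) (c : Char) : pdel (cs ++ [c]) = pdel cs + pdelta c := by
  simp [pdel]

theorem bdel_append_one (cs : List Char) (c : Char) : bdel (cs ++ [c]) = bdel cs + bdelta c := by
  simp [bdel]

theorem noTop_append_one (cs : List Char) (c : Char) (pd bd : Int)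
    (h : noTop cs pd bd) (hc : ¬(c = ',' ∧ pd + pdel cs = 0 ∧ bd + bdel cs = 0)) :
    noTop (cs ++ [c]) pd bd := by
  induction cs generalizing pd bd with
  | nil => simpa [noTop, pdel, bdel] using hc
  | cons d ds ih =>
      obtain ⟨h1, h2⟩ := h
      refine ⟨h1, ih _ _ h2 ?_⟩
      simp only [pdel, bdel, List.map_cons, List.sum_cons] at hc ⊢
      intro ⟨e1, e2, e3⟩
      exact hc ⟨e1, by omega, by omega⟩

theorem splitOnce_of_noTop (cs : List Char) (pd bd : Int) (h : noTop cs pd bd) :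
    splitOnce cs pd bd = (cs, none) := by
  induction cs generalizing pd bd with
  | nil => rfl
  | cons c cs ih =>
      obtain ⟨h1, h2⟩ := h
      simp [splitOnce, h1, ih _ _ h2]

theorem splitOnce_find (cs rest : List Char) (pd bd : Int) (h : noTop cs pd bd)
    (hp : pd + pdel cs = 0) (hb : bd + bdel cs = 0) :
    splitOnce (cs ++ ',' :: rest) pd bd = (cs, some rest) := by
  induction cs generalizing pd bd with
  | nil =>
      simp [pdel, bdel] at hp hb
      simp [splitOnce, hp, hb]
  | cons c cs ih =>
      obtain ⟨h1, h2⟩ := h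
      simp only [pdel, List.map_cons, List.sum_cons] at hp
      simp only [bdel, List.map_cons, List.sum_cons] at hb
      have := ih (pd + pdelta c) (bd + bdelta c) h2 (by simp only [pdel]; omega)
        (by simp only [bdel]; omega)
      simp [splitOnce, h1, this]

theorem goB_none (cs : List Char) (h : splitOnce cs 0 0 = (cs, none)) :
    goB cs = (let seg := PySem.Str.strip (String.ofList cs); if seg ≠ "" then [seg] else []) := by
  rw [goB]
  split
  · next s hnone => rw [h] at hnone; cases hnone; rfl
  · next s rest hsome => rw [h] at hsome; cases hsome

theorem goB_some (cs s rest : List Char) (h : splitOnce cs 0 0 = (s, some rest)) :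
    goB cs = (let seg := PySem.Str.strip (String.ofList s);
      (if seg ≠ "" then [seg] else []) ++ goB rest) := by
  rw [goB]
  split
  · next s' hnone => rw [h] at hnone; cases hnone
  · next s' rest' hsome => rw [h] at hsome; cases hsome; rfl

theorem loopA_eq_goB (cs : List Char) : ∀ (current : List Char) (parts : List String),
    noTop current 0 0 →
    loopA cs parts current (pdel current) (bdel current) = parts ++ goB (current ++ cs) := by
  induction cs with
  | nil =>
      intro current parts h
      rw [goB_none (current ++ []) (by simpa using splitOnce_of_noTop current 0 0 h)]
      simp only [loopA]
      split <;> simp_all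
  | cons c cs ih =>
      intro current parts h
      by_cases hc : c = ',' ∧ pdel current = 0 ∧ bdel current = 0
      · obtain ⟨hc1, hc2, hc3⟩ := hc
        rw [goB_some (current ++ c :: cs) current cs
          (by rw [hc1]; exact splitOnce_find current cs 0 0 h (by omega) (by omega))]
        simp only [loopA, hc1, hc2, hc3, and_self, if_true]
        have := ih [] (if PySem.Str.strip (String.ofList current) ≠ "" then
            parts ++ [PySem.Str.strip (String.ofList current)] else parts) trivial
        simp only [pdel, bdel, List.map_nil, List.sum_nil, List.nil_append] at this
        rw [this]
        split <;> simp
      · have h' : noTop (current ++ [c]) 0 0 :=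
          noTop_append_one current c 0 0 h (by simpa using hc)
        have IH := ih (current ++ [c]) parts h'
        rw [pdel_append_one, bdel_append_one] at IH
        simp only [List.append_assoc, List.cons_append, List.nil_append] at IH
        simp only [loopA, hc, if_false]
        split_ifs with h1 h2 h3 h4 <;>
          simp_all [pdelta, bdelta, sub_eq_add_neg]

-- ===== VERDICT (by name: the statement is the Claim_ definition above) =====
theorem split_top_level_csv_spec : Claim_equal_split_top_level_csv := by
  intro text _
  unfold Spec_split_top_level_csv split_top_level_csv split_top_level_csv_alt
  have := loopA_eq_goB text.toList [] [] trivial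
  simpa [pdel, bdel] using this
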